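-- pv_equiv track=rewrite | github.com/Glennonr/swim-dojo-workouts | script.py | categorize_filters
-- ===== SOURCE A (Python) =====
-- from typing import Dict, List
--
-- def categorize_filters(categories: List[str]) -> Dict[str, List[str]]:
--     """Group categories into logical sections."""
--     distance = [c for c in categories if any(x in c for x in ("-", "+"))]
--     difficulty_order = ["Beginner", "Intermediate", "Advanced", "Hard", "Insane"]
--     difficulty = [c for c in difficulty_order if c in categories]
--     stroke = [c for c in categories if c in ("Freestyle", "Backstroke", "Breaststroke", "Butterfly", "IM", "Stroke")]
--     other = [c for c in categories if c not in distance + difficulty + stroke]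
--     return {
--         "Distance": distance,
--         "Difficulty": difficulty,
--         "Stroke": stroke,
--         "Other": sorted(other),
--     }
-- ===== SOURCE B (Python) =====
-- def categorize_filters(categories):
--     """Group categories into logical sections (single partitioning pass)."""
--     difficulty_order = ["Beginner", "Intermediate", "Advanced", "Hard", "Insane"]
--     strokes = ("Freestyle", "Backstroke", "Breaststroke", "Butterfly", "IM", "Stroke")
--     difficulty_names = set(difficulty_order)
--     present = set(categories)
--     distance, stroke, other = [], [], []
--     for c in categories:
--         if "-" in c or "+" in c:
--             distance.append(c)
--         elif c in strokes:
--             stroke.append(c)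
--         elif c in difficulty_names:
--             pass  # collected below in difficulty_order order
--         else:
--             other.append(c)
--     return {
--         "Distance": distance,
--         "Difficulty": [c for c in difficulty_order if c in present],
--         "Stroke": stroke,
--         "Other": sorted(other),
--     }
-- ===== Notes on version B (the rewrite author's own statement) =====
-- stated objective: faster
-- what changed: Replaces A's three separate filtering scans over categories (including the quadratic 'c not in distance+difficulty+stroke' test) with one partitioning pass that classifies each element by an if/elif chain, plus set lookups for membership.
import Mathlib
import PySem

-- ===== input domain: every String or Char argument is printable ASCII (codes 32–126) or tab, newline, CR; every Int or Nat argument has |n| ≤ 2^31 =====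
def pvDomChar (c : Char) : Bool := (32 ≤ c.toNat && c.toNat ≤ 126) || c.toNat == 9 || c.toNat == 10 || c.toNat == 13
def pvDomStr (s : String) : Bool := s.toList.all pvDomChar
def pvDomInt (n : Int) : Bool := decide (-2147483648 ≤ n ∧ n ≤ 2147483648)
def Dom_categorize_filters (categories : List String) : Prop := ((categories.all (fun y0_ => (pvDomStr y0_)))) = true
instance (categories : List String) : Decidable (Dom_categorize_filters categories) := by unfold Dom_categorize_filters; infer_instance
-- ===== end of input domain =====

-- B replaces A's repeated filtering scans over categories (including the quadratic
-- 'c not in distance + difficulty + stroke' membership test) with one partitioning pass.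


-- ===== PORT A =====
-- A-side constants (the difficulty_order list and the stroke tuple of A)
def difficultyOrderA : List String := ["Beginner", "Intermediate", "Advanced", "Hard", "Insane"]
def strokeNamesA : List String := ["Freestyle", "Backstroke", "Breaststroke", "Butterfly", "IM", "Stroke"]

def categorize_filters (categories : List String) : List (String × List String) :=
  -- distance = [c for c in categories if any(x in c for x in ("-", "+"))]
  let distance := categories.filter (fun c => PySem.Str.isIn "-" c || PySem.Str.isIn "+" c)
  -- difficulty = [c for c in difficulty_order if c in categories]
  let difficulty := difficultyOrderA.filter (fun c => categories.contains c)
  -- stroke = [c for c in categories if c in ("Freestyle", ..., "Stroke")]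
  let stroke := categories.filter (fun c => strokeNamesA.contains c)
  -- other = [c for c in categories if c not in distance + difficulty + stroke]
  let other := categories.filter (fun c => !((distance ++ difficulty ++ stroke).contains c))
  [("Distance", distance), ("Difficulty", difficulty), ("Stroke", stroke),
   ("Other", PySem.List.sorted other (fun x => x) false)]

-- ===== PORT B =====
-- B-side constants
def difficultyOrderB : List String := ["Beginner", "Intermediate", "Advanced", "Hard", "Insane"]
def strokeNamesB : List String := ["Freestyle", "Backstroke", "Breaststroke", "Butterfly", "IM", "Stroke"]

-- the body of B's single partitioning loop; state = (distance, stroke, other)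
def partStep (st : List String × List String × List String) (c : String) :
    List String × List String × List String :=
  if PySem.Str.isIn "-" c || PySem.Str.isIn "+" c then (st.1 ++ [c], st.2.1, st.2.2)
  else if strokeNamesB.contains c then (st.1, st.2.1 ++ [c], st.2.2)
  else if difficultyOrderB.contains c then st
  else (st.1, st.2.1, st.2.2 ++ [c])

def categorize_filters_alt (categories : List String) : List (String × List String) :=
  let st := categories.foldl partStep ([], [], [])
  [("Distance", st.1),
   ("Difficulty", difficultyOrderB.filter (fun c => categories.contains c)),
   ("Stroke", st.2.1),
   ("Other", PySem.List.sorted st.2.2 (fun x => x) false)]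

-- ===== PRECONDITION & SPEC =====
def Spec_categorize_filters (categories : List String) (out : List (String × List String)) : Prop := out = categorize_filters_alt categories
instance (categories : List String) (out : List (String × List String)) : Decidable (Spec_categorize_filters categories out) := by unfold Spec_categorize_filters; infer_instance

-- ===== CLAIM (what is proved, stated in full; the proofs are below) =====
def Claim_equal_categorize_filters : Prop := ∀ (categories : List String), Dom_categorize_filters categories → Spec_categorize_filters categories (categorize_filters categories)

-- ===== LEMMAS AND PROOFS =====

-- a stroke name never contains '-' or '+'
lemma stroke_no_dist (c : String) (h : c ∈ strokeNamesB) :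
    (PySem.Str.isIn "-" c || PySem.Str.isIn "+" c) = false := by
  fin_cases h <;> decide

-- B's fold computes three filters of the input list
lemma part_spec (l : List String) (d s o : List String) :
    l.foldl partStep (d, s, o) =
      (d ++ l.filter (fun c => PySem.Str.isIn "-" c || PySem.Str.isIn "+" c),
       s ++ l.filter (fun c => !(PySem.Str.isIn "-" c || PySem.Str.isIn "+" c)
                      && strokeNamesB.contains c),
       o ++ l.filter (fun c => !(PySem.Str.isIn "-" c || PySem.Str.isIn "+" c)
                      && !strokeNamesB.contains c && !difficultyOrderB.contains c)) := by
  induction l generalizing d s o with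
  | nil => simp
  | cons c t ih =>
    by_cases h1 : (PySem.Str.isIn "-" c || PySem.Str.isIn "+" c) = true
    · have h1' : PySem.Chars.isIn ['-'] c.toList = true ∨ PySem.Chars.isIn ['+'] c.toList = true := by
        simpa using h1
      rw [List.foldl_cons, show partStep (d, s, o) c = (d ++ [c], s, o) by
        simp [partStep, h1'], ih]
      simp_all [List.filter_cons]
      exact ⟨fun hm hp => absurd h1' (by simp [hm, hp]),
             fun hm hp _ => absurd h1' (by simp [hm, hp])⟩
    · have h1' : ¬(PySem.Chars.isIn ['-'] c.toList = true ∨ PySem.Chars.isIn ['+'] c.toList = true) := by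
        simpa using h1
      by_cases h2 : c ∈ strokeNamesB
      · rw [List.foldl_cons, show partStep (d, s, o) c = (d, s ++ [c], o) by
          simp [partStep, h1', h2], ih]
        simp_all
      · by_cases h3 : c ∈ difficultyOrderB
        · rw [List.foldl_cons, show partStep (d, s, o) c = (d, s, o) by
            simp [partStep, h1', h2, h3], ih]
          simp_all
        · rw [List.foldl_cons, show partStep (d, s, o) c = (d, s, o ++ [c]) by
            simp [partStep, h1', h2, h3], ih]
          simp_all

-- A's stroke filter equals B's (the two extra negations never fire on stroke names)
lemma stroke_filter_eq (l : List String) :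
    l.filter (fun c => strokeNamesA.contains c) =
      l.filter (fun c => !(PySem.Str.isIn "-" c || PySem.Str.isIn "+" c)
                && strokeNamesB.contains c) := by
  apply List.filter_congr
  intro c _
  by_cases h : c ∈ strokeNamesB
  · have hf := stroke_no_dist c h
    simp at hf
    simp_all [strokeNamesA, strokeNamesB]
  · simp [strokeNamesA, strokeNamesB] at h ⊢
    simp [h]

-- A's 'other' filter (membership in the concatenation) equals B's residual filter
lemma other_filter_eq (categories : List String) :
    List.filter (fun c =>
        !((categories.filter (fun c => PySem.Str.isIn "-" c || PySem.Str.isIn "+" c)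
          ++ difficultyOrderA.filter (fun c => categories.contains c)
          ++ categories.filter (fun c => strokeNamesA.contains c)).contains c)) categories
    = List.filter (fun c => !(PySem.Str.isIn "-" c || PySem.Str.isIn "+" c)
          && !strokeNamesB.contains c && !difficultyOrderB.contains c) categories := by
  apply List.filter_congr
  intro c hc
  simp [hc, strokeNamesA, strokeNamesB, difficultyOrderA, difficultyOrderB,
        Bool.and_comm, Bool.and_assoc]

-- ===== VERDICT (by name: the statement is the Claim_ definition above) =====
theorem categorize_filters_spec : Claim_equal_categorize_filters := by
  intro categories _
  unfold Spec_categorize_filters categorize_filters categorize_filters_alt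
  rw [part_spec]
  simp only [List.nil_append]
  rw [← stroke_filter_eq, ← other_filter_eq]
  rfl
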